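-- pv_equiv track=rewrite | github.com/akikuno/DAJIN2 | src/DAJIN2/core/preprocess/replace_NtoD.py | replace_NtoD
-- ===== SOURCE A (Python) =====
-- def _replaceNtoD(cssplits_sample, sequence) -> list[list[str]]:
--     cssplits_replaced = cssplits_sample.copy()
--     for i, cssplits in enumerate(cssplits_sample):
--         # extract right/left index of the end of sequential Ns
--         left_idx_n = 0
--         for cs in cssplits:
--             if cs != "N":
--                 break
--             left_idx_n += 1
--         right_idx_n = 0
--         for cs in cssplits[::-1]:
--             if cs != "N":
--                 break
--             right_idx_n += 1
--         right_idx_n = len(cssplits) - right_idx_n - 1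
--         # replace sequential Ns within the sequence
--         for j, (cs, seq) in enumerate(zip(cssplits, sequence)):
--             if left_idx_n <= j <= right_idx_n and cs == "N":
--                 cssplits_replaced[i][j] = f"-{seq}"
--     return cssplits_replaced
--
-- def replace_NtoD(midsv_sample_alleles: dict[str, list[dict]], FASTA_ALLELES: dict) -> dict[str, list[dict]]:
--     """
--     Convert any `N` as deletions other than consecutive `N` from both ends
--     """
--     midsv_updated = dict()
--     for allele, sequence in FASTA_ALLELES.items():
--         midsv_sample = midsv_sample_alleles[allele]
--         cssplits_sample = [cs["CSSPLIT"].split(",") for cs in midsv_sample]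
--         cssplits_replaced = _replaceNtoD(cssplits_sample, sequence)
--         midsv_cssplits = [",".join(cs) for cs in cssplits_replaced]
--         # Save as a json
--         for i, cssplits in enumerate(midsv_cssplits):
--             midsv_sample[i]["CSSPLIT"] = cssplits
--         midsv_updated[allele] = midsv_sample
--     return midsv_updated
-- ===== SOURCE B (Python) =====
-- # B: run-length decomposition via itertools.groupby — pair each field with its
-- # sequence char (None beyond), group into maximal N / non-N runs, emit interior
-- # N-runs as deletions wholesale and every other run verbatim. Builds fresh
-- # records (A mutates its input's records in place; the equivalence is about the
-- # return value).
-- from itertools import groupby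
--
--
-- def replace_NtoD(midsv_sample_alleles: dict[str, list[dict]], FASTA_ALLELES: dict) -> dict[str, list[dict]]:
--     midsv_updated = {}
--     for allele, sequence in FASTA_ALLELES.items():
--         records = []
--         for record in midsv_sample_alleles[allele]:
--             fields = record["CSSPLIT"].split(",")
--             padded = list(zip(fields, list(sequence) + [None] * (len(fields) - len(sequence))))
--             groups = [(key, list(chunk)) for key, chunk in groupby(padded, key=lambda p: p[0] == "N")]
--             out = []
--             for idx, (is_n, chunk) in enumerate(groups):
--                 if is_n and 0 < idx < len(groups) - 1:
--                     out.extend("N" if s is None else f"-{s}" for _, s in chunk)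
--                 else:
--                     out.extend(cs for cs, _ in chunk)
--             record = dict(record)
--             record["CSSPLIT"] = ",".join(out)
--             records.append(record)
--         midsv_updated[allele] = records
--     return midsv_updated
-- ===== Notes on version B (the rewrite author's own statement) =====
-- stated objective: alternative
-- what changed: A scans each row by index, counting the leading and trailing N runs and then conditionally rewriting each cell inside the computed window; B never counts end runs or tests indices against a window: it zips each field with its sequence char, run-length-decomposes the row into maximal N/non-N runs with itertools.groupby, and emits interior N-runs wholesale as deletions and every other run verbatim.
import Mathlib
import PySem

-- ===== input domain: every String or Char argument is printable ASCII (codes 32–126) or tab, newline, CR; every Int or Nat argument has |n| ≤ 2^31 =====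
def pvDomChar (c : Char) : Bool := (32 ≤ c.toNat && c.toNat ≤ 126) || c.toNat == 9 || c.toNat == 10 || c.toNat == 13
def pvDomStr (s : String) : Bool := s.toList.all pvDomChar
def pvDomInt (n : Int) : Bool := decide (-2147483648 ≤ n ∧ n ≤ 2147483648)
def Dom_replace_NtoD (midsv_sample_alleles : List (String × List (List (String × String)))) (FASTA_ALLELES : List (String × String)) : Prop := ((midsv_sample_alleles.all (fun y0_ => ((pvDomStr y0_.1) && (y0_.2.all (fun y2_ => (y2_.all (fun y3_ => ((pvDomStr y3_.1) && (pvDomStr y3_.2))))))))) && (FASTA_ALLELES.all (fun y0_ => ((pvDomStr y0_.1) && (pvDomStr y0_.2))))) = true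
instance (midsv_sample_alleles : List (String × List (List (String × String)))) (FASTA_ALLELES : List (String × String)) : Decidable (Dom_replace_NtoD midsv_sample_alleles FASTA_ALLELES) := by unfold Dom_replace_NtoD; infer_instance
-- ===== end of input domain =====

-- A scans each row by index inside a window computed from the two end-run counts; B pairs each
-- field with its sequence char, run-length-decomposes the row into maximal N/non-N runs
-- (itertools.groupby) and emits interior N-runs wholesale as deletions, all other runs verbatim
-- (objective: alternative).  Python A mutates its argument's records in place; the equivalence
-- proved here is about the return value only.

-- ===== PORT A =====
-- s.split(","): the separator is non-empty, so PySem.Str.split? is always `some`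
def pvSplitComma (s : String) : List String := (PySem.Str.split? s ",").getD []

-- 'left_idx_n = 0; for cs in …: if cs != "N": break; left_idx_n += 1'
def pvLeftIdxN : List String → Int
  | [] => 0
  | cs :: rest => if cs ≠ "N" then 0 else pvLeftIdxN rest + 1

-- _replaceNtoD(cssplits_sample, sequence); the in-place mutations 'cssplits_replaced[i][j] = …'
-- become functional updates (List.modify / List.set) of the running copy.
def pvReplaceNtoD (cssplits_sample : List (List String)) (sequence : String) : List (List String) :=
  (PySem.List.enumerate cssplits_sample).foldl (fun repl ic =>
    let cssplits := ic.2
    let left_idx_n := pvLeftIdxN cssplits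
    let r := pvLeftIdxN cssplits.reverse   -- 'for cs in cssplits[::-1]' counts the same run
    let right_idx_n := (cssplits.length : Int) - r - 1
    (PySem.List.enumerate (List.zip cssplits sequence.toList)).foldl (fun repl jp =>
      if left_idx_n ≤ jp.1 ∧ jp.1 ≤ right_idx_n ∧ jp.2.1 = "N" then
        repl.modify ic.1.toNat (fun row => row.set jp.1.toNat (String.ofList ['-', jp.2.2]))  -- f"-{seq}"
      else repl) repl) cssplits_sample

def replace_NtoD (midsv_sample_alleles : List (String × List (List (String × String)))) (FASTA_ALLELES : List (String × String)) : List (String × List (List (String × String))) :=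
  (FASTA_ALLELES.foldl (fun (midsv_updated : PySem.Dict String (List (List (String × String)))) kv =>
    let sequence := kv.2
    -- midsv_sample_alleles[allele]: KeyError (excluded by Pre_) modelled by the .getD [] fallback
    let midsv_sample := ((PySem.Dict.mk midsv_sample_alleles).get? kv.1).getD []
    -- cs["CSSPLIT"]: KeyError (excluded by Pre_) modelled by the .getD "" fallback
    let cssplits_sample := midsv_sample.map (fun cs => pvSplitComma (((PySem.Dict.mk cs).get? "CSSPLIT").getD ""))
    let cssplits_replaced := pvReplaceNtoD cssplits_sample sequence
    let midsv_cssplits := cssplits_replaced.map (fun cs => PySem.Str.join "," cs)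
    -- 'midsv_sample[i]["CSSPLIT"] = cssplits' as a functional update of the list of records
    let midsv_sample' := (PySem.List.enumerate midsv_cssplits).foldl (fun st ic =>
      st.modify ic.1.toNat (fun record => (PySem.Dict.insert (PySem.Dict.mk record) "CSSPLIT" ic.2).items)) midsv_sample
    PySem.Dict.insert midsv_updated kv.1 midsv_sample') PySem.Dict.empty).items

-- ===== PORT B =====
-- itertools.groupby(padded, key=lambda p: p[0] == "N"): maximal runs of equal key
def pvRuns : List (String × Option Char) → List (Bool × List (String × Option Char))
  | [] => []
  | el :: rest =>
      (el.1 == "N", el :: rest.takeWhile (fun x => (x.1 == "N") == (el.1 == "N"))) ::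
      pvRuns (rest.dropWhile (fun x => (x.1 == "N") == (el.1 == "N")))
termination_by l => l.length
decreasing_by
  simp only [List.length_cons]
  exact Nat.lt_succ_of_le (List.length_dropWhile_le _ _)

-- one record's row: pad with the sequence, group, replace interior N-runs wholesale
def pvRowB (fields : List String) (sequence : List Char) : List String :=
  let padded := fields.zip (sequence.map some ++ List.replicate (fields.length - sequence.length) (none : Option Char))
  let groups := pvRuns padded
  (PySem.List.enumerate groups).foldl (fun out g =>
    if g.2.1 = true ∧ 0 < g.1 ∧ g.1 < (groups.length : Int) - 1 then
      out ++ g.2.2.map (fun el => match el.2 with | none => "N" | some s => String.ofList ['-', s])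
    else
      out ++ g.2.2.map (fun el => el.1)) []

def replace_NtoD_alt (midsv_sample_alleles : List (String × List (List (String × String)))) (FASTA_ALLELES : List (String × String)) : List (String × List (List (String × String))) :=
  (FASTA_ALLELES.foldl (fun (midsv_updated : PySem.Dict String (List (List (String × String)))) kv =>
    let records := (((PySem.Dict.mk midsv_sample_alleles).get? kv.1).getD []).map (fun record =>
      let fields := pvSplitComma (((PySem.Dict.mk record).get? "CSSPLIT").getD "")
      (PySem.Dict.insert (PySem.Dict.mk record) "CSSPLIT" (PySem.Str.join "," (pvRowB fields kv.2.toList))).items)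
    PySem.Dict.insert midsv_updated kv.1 records) PySem.Dict.empty).items

-- ===== PRECONDITION & SPEC =====
-- Pre_ excludes exactly the inputs where Python A raises KeyError: a FASTA allele missing from
-- midsv_sample_alleles, or a record of a selected allele without the "CSSPLIT" key.
def Pre_replace_NtoD (midsv_sample_alleles : List (String × List (List (String × String)))) (FASTA_ALLELES : List (String × String)) : Prop :=
  (FASTA_ALLELES.all (fun kv =>
    match (PySem.Dict.mk midsv_sample_alleles).get? kv.1 with
    | none => false
    | some recs => recs.all (fun record => (PySem.Dict.mk record).contains "CSSPLIT"))) = true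
instance (midsv_sample_alleles : List (String × List (List (String × String)))) (FASTA_ALLELES : List (String × String)) : Decidable (Pre_replace_NtoD midsv_sample_alleles FASTA_ALLELES) := by unfold Pre_replace_NtoD; infer_instance

def pvWitness_replace_NtoD : (List (String × List (List (String × String)))) × (List (String × String)) :=
  ([("a", [[("CSSPLIT", "N,=A,N,N")], [("CSSPLIT", "N,N")]])], [("a", "ACGT")])

def Spec_replace_NtoD (midsv_sample_alleles : List (String × List (List (String × String)))) (FASTA_ALLELES : List (String × String)) (out : List (String × List (List (String × String)))) : Prop := out = replace_NtoD_alt midsv_sample_alleles FASTA_ALLELES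
instance (midsv_sample_alleles : List (String × List (List (String × String)))) (FASTA_ALLELES : List (String × String)) (out : List (String × List (List (String × String)))) : Decidable (Spec_replace_NtoD midsv_sample_alleles FASTA_ALLELES out) := by unfold Spec_replace_NtoD; infer_instance

-- ===== CLAIM (what is proved, stated in full; the proofs are below) =====
def Claim_equal_replace_NtoD : Prop := ∀ (midsv_sample_alleles : List (String × List (List (String × String)))) (FASTA_ALLELES : List (String × String)), Dom_replace_NtoD midsv_sample_alleles FASTA_ALLELES → Pre_replace_NtoD midsv_sample_alleles FASTA_ALLELES → Spec_replace_NtoD midsv_sample_alleles FASTA_ALLELES (replace_NtoD midsv_sample_alleles FASTA_ALLELES)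

-- ===== LEMMAS AND PROOFS =====

-- ---- proof-only definitions ----

-- the padded row both sides are compared on
def pvPad (fields : List String) (seq : List Char) : List (String × Option Char) :=
  fields.zip (seq.map some ++ List.replicate (fields.length - seq.length) (none : Option Char))

-- pointwise specification of one replaced cell
def pvPoint (L T n : Int) (jel : Int × String × Option Char) : String :=
  if L ≤ jel.1 ∧ jel.1 ≤ n - T - 1 ∧ jel.2.1 = "N" then
    match jel.2.2 with
    | some s => String.ofList ['-', s]
    | none => jel.2.1
  else jel.2.1

-- the common row specification both row algorithms are proved equal to
def pvSpecRow (row : List String) (seq : List Char) : List String :=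
  (PySem.List.enumerate (pvPad row seq)).map
    (pvPoint ((row.takeWhile (fun cs => cs == "N")).length : Int)
             ((row.reverse.takeWhile (fun cs => cs == "N")).length : Int)
             (row.length : Int))

-- ---- generic lemmas (A side, kept from the fold analysis) ----

theorem pvLeftIdxN_eq (l : List String) : pvLeftIdxN l = ((l.takeWhile (fun cs => cs == "N")).length : Int) := by
  induction l with
  | nil => simp [pvLeftIdxN]
  | cons cs rest ih =>
    by_cases h : cs = "N"
    · simp only [pvLeftIdxN, h, ih, List.takeWhile_cons]
      simp
    · simp [pvLeftIdxN, h]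

theorem pv_modify_append {α : Type} (f : α → α) : ∀ (pre : List α) (a : α) (post : List α),
    (pre ++ a :: post).modify pre.length f = pre ++ f a :: post := by
  intro pre
  induction pre with
  | nil => intro a post; simp [List.modify_zero_cons]
  | cons x xs ih => intro a post; simp [List.modify_succ_cons, ih]

theorem pv_set_append {α : Type} : ∀ (pre : List α) (a : α) (post : List α) (v : α),
    (pre ++ a :: post).set pre.length v = pre ++ v :: post := by
  intro pre
  induction pre with
  | nil => intro a post v; simp
  | cons x xs ih => intro a post v; simp [ih]

theorem pv_foldl_ite_modify {α γ : Type} (i : Nat) (Q : γ → Prop) [DecidablePred Q] (f : γ → α → α) :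
    ∀ (ps : List γ) (st : List α),
    ps.foldl (fun st p => if Q p then st.modify i (f p) else st) st
      = st.modify i (fun a => ps.foldl (fun a p => if Q p then f p a else a) a) := by
  intro ps
  induction ps with
  | nil =>
    intro st
    show st = st.modify i id
    exact (List.modify_id ..).symm
  | cons p ps ih =>
    intro st
    by_cases h : Q p
    · simp only [List.foldl_cons, if_pos h, ih, List.modify_modify_eq]
      rfl
    · simp only [List.foldl_cons, if_neg h, ih]

theorem pv_foldl_enumerate_modify {α β : Type} (g : β → α → α) :
    ∀ (ys : List β) (pre st : List α), st.length = ys.length →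
    (PySem.List.enumerate ys (pre.length : Int)).foldl
        (fun acc p => acc.modify p.1.toNat (g p.2)) (pre ++ st)
      = pre ++ List.zipWith (fun a c => g c a) st ys := by
  intro ys
  induction ys with
  | nil => intro pre st h; simp_all [PySem.List.enumerate_nil, List.length_eq_zero_iff.mp h]
  | cons c ys ih =>
    intro pre st h
    match st with
    | [] => simp at h
    | a :: st =>
      rw [PySem.List.enumerate_cons, List.foldl_cons]
      have h1 : ((pre.length : Int)).toNat = pre.length := by simp
      rw [h1, pv_modify_append]
      have h2 : ((pre.length : Int) + 1) = (((pre ++ [g c a]).length : Nat) : Int) := by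
        simp
      have h3 : pre ++ g c a :: st = (pre ++ [g c a]) ++ st := by simp
      rw [h2, h3, ih (pre ++ [g c a]) st (by simpa using h)]
      simp

theorem pv_foldl_enumerate_set {α β : Type} (v : Int × β → α) (Q : Int × β → Prop) [DecidablePred Q] :
    ∀ (zs : List β) (pre st : List α), zs.length ≤ st.length →
    (PySem.List.enumerate zs (pre.length : Int)).foldl
        (fun acc p => if Q p then acc.set p.1.toNat (v p) else acc) (pre ++ st)
      = pre ++ List.zipWith (fun a p => if Q p then v p else a) st (PySem.List.enumerate zs (pre.length : Int)) ++ st.drop zs.length := by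
  intro zs
  induction zs with
  | nil => intro pre st h; simp [PySem.List.enumerate_nil]
  | cons z zs ih =>
    intro pre st h
    match st with
    | [] => simp at h
    | a :: st =>
      rw [PySem.List.enumerate_cons, List.foldl_cons]
      have h1 : ((pre.length : Int)).toNat = pre.length := by simp
      have hstep : (if Q ((pre.length : Int), z) then (pre ++ a :: st).set ((pre.length : Int)).toNat (v ((pre.length : Int), z)) else pre ++ a :: st)
          = pre ++ (if Q ((pre.length : Int), z) then v ((pre.length : Int), z) else a) :: st := by
        split_ifs with hq
        · rw [h1, pv_set_append]
        · rfl
      rw [hstep]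
      have h2 : ((pre.length : Int) + 1) = (((pre ++ [(if Q ((pre.length : Int), z) then v ((pre.length : Int), z) else a)]).length : Nat) : Int) := by
        simp
      have h3 : pre ++ (if Q ((pre.length : Int), z) then v ((pre.length : Int), z) else a) :: st = (pre ++ [(if Q ((pre.length : Int), z) then v ((pre.length : Int), z) else a)]) ++ st := by simp
      rw [h2, h3, ih _ st (by simpa using Nat.le_of_succ_le_succ h)]
      rw [← h2]
      simp [List.zipWith_cons_cons]

theorem pv_patch_getElem? {α β : Type} (g : α → β → α) :
    ∀ (es : List β) (row : List α) (k : Nat),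
    (List.zipWith g row es ++ row.drop es.length)[k]? =
      match row[k]?, es[k]? with
      | some a, some e => some (g a e)
      | some a, none => some a
      | none, _ => none := by
  intro es
  induction es with
  | nil => intro row k; cases hr : row[k]? <;> simp [hr]
  | cons e es ih =>
    intro row k
    match row with
    | [] => simp
    | a :: row =>
      match k with
      | 0 => simp
      | (k+1) => simpa using ih row k

-- A'S ROW: the windowed conditional replacement equals the pointwise spec
theorem pv_row_eqA (row : List String) (seq : List Char) :
    (PySem.List.enumerate (List.zip row seq)).foldl (fun r jp =>
      if pvLeftIdxN row ≤ jp.1 ∧ jp.1 ≤ (row.length : Int) - pvLeftIdxN row.reverse - 1 ∧ jp.2.1 = "N" then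
        r.set jp.1.toNat (String.ofList ['-', jp.2.2])
      else r) row
    = pvSpecRow row seq := by
  have henl : (PySem.List.enumerate (List.zip row seq) (0 : Int)).length = (List.zip row seq).length := by
    simp
  have h0 := pv_foldl_enumerate_set
      (v := fun jp : Int × String × Char => String.ofList ['-', jp.2.2])
      (Q := fun jp : Int × String × Char => pvLeftIdxN row ≤ jp.1 ∧ jp.1 ≤ (row.length : Int) - pvLeftIdxN row.reverse - 1 ∧ jp.2.1 = "N")
      (List.zip row seq) [] row (by simp [List.length_zip])
  simp only [List.nil_append, List.length_nil, Nat.cast_zero] at h0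
  refine h0.trans ?_
  rw [← henl]
  apply List.ext_getElem?
  intro k
  rw [pv_patch_getElem?]
  unfold pvSpecRow pvPad
  rw [List.getElem?_map, PySem.List.getElem?_enumerate, PySem.List.getElem?_enumerate]
  have hpadsl : (seq.map some ++ List.replicate (row.length - seq.length) (none : Option Char)).length = seq.length + (row.length - seq.length) := by simp
  by_cases hk : k < row.length
  · have hr : row[k]? = some (row[k]) := List.getElem?_eq_getElem hk
    have hkp : k < (row.zip (seq.map some ++ List.replicate (row.length - seq.length) (none : Option Char))).length := by
      rw [List.length_zip]; omega
    have hpadk : (row.zip (seq.map some ++ List.replicate (row.length - seq.length) (none : Option Char)))[k]? =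
        some (row[k], (seq.map some ++ List.replicate (row.length - seq.length) (none : Option Char))[k]'(by simp; omega)) := by
      rw [List.getElem?_eq_getElem hkp]
      simp [List.getElem_zip]
    rw [hr, hpadk]
    by_cases hs : k < seq.length
    · have hm : k < min row.length seq.length := by omega
      have hz : (List.zip row seq)[k]? = some (row[k], seq[k]) := by
        rw [List.getElem?_eq_getElem (by rw [List.length_zip]; omega)]
        simp [List.getElem_zip]
      rw [hz]
      have hpads : (seq.map some ++ List.replicate (row.length - seq.length) (none : Option Char))[k]'(by simp; omega) = some (seq[k]) := by
        rw [List.getElem_append_left (by simpa using hs)]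
        simp
      rw [hpads]
      simp only [Option.map_some, zero_add]
      unfold pvPoint
      rw [pvLeftIdxN_eq row, pvLeftIdxN_eq row.reverse]
    · have hz : (List.zip row seq)[k]? = none :=
        List.getElem?_eq_none (by rw [List.length_zip]; omega)
      rw [hz]
      have hpads : (seq.map some ++ List.replicate (row.length - seq.length) (none : Option Char))[k]'(by simp; omega) = (none : Option Char) := by
        rw [List.getElem_append_right (by simpa using hs)]
        simp
      rw [hpads]
      simp only [Option.map_none, Option.map_some, zero_add]
      unfold pvPoint
      by_cases hC : ((((row.takeWhile (fun cs => cs == "N")).length : Nat) : Int) ≤ (k : Int) ∧ ((k : Int)) ≤ (row.length : Int) - (((row.reverse.takeWhile (fun cs => cs == "N")).length : Nat) : Int) - 1 ∧ row[k] = "N")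
      · rw [if_pos hC]
      · rw [if_neg hC]
  · have hr : row[k]? = none := List.getElem?_eq_none (by omega)
    have hpadk : (row.zip (seq.map some ++ List.replicate (row.length - seq.length) (none : Option Char)))[k]? = none :=
      List.getElem?_eq_none (by rw [List.length_zip]; omega)
    rw [hr, hpadk]
    simp

-- ---- B side: structure of pvRuns ----

theorem pv_takeWhile_all {α : Type} (p : α → Bool) (l : List α) (h : ∀ x ∈ l, p x = true) :
    l.takeWhile p = l := List.takeWhile_eq_self_iff.mpr h

theorem pv_takeWhile_none {α : Type} (p : α → Bool) (l : List α) (h : ∀ x ∈ l, p x = false) :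
    l.takeWhile p = [] := by
  cases l with
  | nil => rfl
  | cons a l => simp [h a (by simp)]

theorem pv_getLast_cons {α : Type} (a : α) (l : List α) (h : l ≠ []) : (a :: l).getLast? = l.getLast? := by
  cases l with
  | nil => exact absurd rfl h
  | cons b l => exact List.getLast?_cons_cons

theorem pvRuns_eq_nil_iff (l : List (String × Option Char)) : pvRuns l = [] ↔ l = [] := by
  cases l <;> simp [pvRuns]

theorem pvRuns_flatten (l : List (String × Option Char)) : ((pvRuns l).map (·.2)).flatten = l := by
  induction l using pvRuns.induct with
  | case1 => simp [pvRuns]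
  | case2 el rest ih =>
    rw [pvRuns]
    simp only [List.map_cons, List.flatten_cons, ih]
    simp [List.takeWhile_append_dropWhile]

theorem pvRuns_chunks (l : List (String × Option Char)) :
    ∀ g ∈ pvRuns l, g.2 ≠ [] ∧ ∀ el ∈ g.2, (el.1 == "N") = g.1 := by
  induction l using pvRuns.induct with
  | case1 => simp [pvRuns]
  | case2 el rest ih =>
    rw [pvRuns]
    intro g hg
    rcases List.mem_cons.mp hg with h | h
    · subst h
      refine ⟨by simp, ?_⟩
      intro x hx
      rcases List.mem_cons.mp hx with h | h
      · subst h; rfl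
      · have := List.mem_takeWhile_imp h
        simpa using this
    · exact ih g h

-- leading run: the first group is exactly the leading N-run (or the run is empty)
theorem pvRuns_head (l : List (String × Option Char)) (b : Bool) (c : List (String × Option Char))
    (gs : List (Bool × List (String × Option Char))) (h : pvRuns l = (b, c) :: gs) :
    l.takeWhile (fun el => el.1 == "N") = if b then c else [] := by
  cases l with
  | nil => rw [pvRuns] at h; exact absurd h (by simp)
  | cons el rest =>
    rw [pvRuns] at h
    injection h with h1 h2
    injection h1 with hb hc
    subst hb; subst hc
    by_cases hN : (el.1 == "N") = true
    · rw [if_pos hN]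
      rw [List.takeWhile_cons, if_pos hN]
      congr 1
      have heq : (fun (x : String × Option Char) => (x.1 == "N") == (el.1 == "N")) = (fun x => x.1 == "N") := by
        funext x; rw [hN]; simp
      rw [heq]
    · rw [if_neg hN, List.takeWhile_cons, if_neg hN]

-- trailing run: the last group is exactly the trailing N-run (or the run is empty)
theorem pvRuns_last : ∀ (l : List (String × Option Char)) (init : List (Bool × List (String × Option Char)))
    (gN : Bool × List (String × Option Char)), pvRuns l = init ++ [gN] →
    l.reverse.takeWhile (fun el => el.1 == "N") = if gN.1 then gN.2.reverse else [] := by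
  intro l
  induction l using pvRuns.induct with
  | case1 => intro init gN h; rw [pvRuns] at h; exact absurd h (by simp)
  | case2 el rest ih =>
    intro init gN h
    rw [pvRuns] at h
    by_cases hr : pvRuns (rest.dropWhile (fun x => (x.1 == "N") == (el.1 == "N"))) = []
    · -- single group
      have hrest : rest.dropWhile (fun x => (x.1 == "N") == (el.1 == "N")) = [] :=
        (pvRuns_eq_nil_iff _).mp hr
      rw [hr] at h
      have hrest2 : rest.takeWhile (fun x => (x.1 == "N") == (el.1 == "N")) = rest := by
        have := List.takeWhile_append_dropWhile (p := fun (x : String × Option Char) => (x.1 == "N") == (el.1 == "N")) (l := rest)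
        rw [hrest] at this; simpa using this
      have hg : gN = (el.1 == "N", el :: rest.takeWhile (fun x => (x.1 == "N") == (el.1 == "N"))) := by
        cases init with
        | nil =>
          have : [(el.1 == "N", el :: rest.takeWhile (fun x => (x.1 == "N") == (el.1 == "N")))] = [gN] := by simpa using h
          simpa using this.symm
        | cons i0 init' => simp at h
      subst hg
      have hall : ∀ x ∈ (el :: rest), (x.1 == "N") = (el.1 == "N") := by
        intro x hx
        rcases List.mem_cons.mp hx with h | h
        · subst h; rfl
        · have : x ∈ rest.takeWhile (fun x => (x.1 == "N") == (el.1 == "N")) := by rw [hrest2]; exact h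
          simpa using List.mem_takeWhile_imp this
      by_cases hN : (el.1 == "N") = true
      · rw [if_pos (by simpa using hN)]
        simp only [hrest2]
        exact pv_takeWhile_all _ _ (by intro x hx; rw [hall x (List.mem_reverse.mp hx)]; exact hN)
      · rw [if_neg (by simpa using hN)]
        exact pv_takeWhile_none _ _ (by
          intro x hx
          have := hall x (List.mem_reverse.mp hx)
          simp only [this]
          simpa using hN)
    · -- at least two groups
      cases init with
      | nil =>
        exfalso
        have h2 : pvRuns (rest.dropWhile (fun x => (x.1 == "N") == (el.1 == "N"))) = [] := by
          have := congrArg List.tail h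
          simpa using this
        exact hr h2
      | cons i0 init' =>
        rw [List.cons_append] at h
        injection h with h1 h2
        have ihh := ih init' gN h2
        have hrne : rest.dropWhile (fun x => (x.1 == "N") == (el.1 == "N")) ≠ [] := by
          intro hc; rw [hc] at hr; rw [pvRuns] at hr; simp at hr
        have hsplit : el :: rest = (el :: rest.takeWhile (fun x => (x.1 == "N") == (el.1 == "N"))) ++ rest.dropWhile (fun x => (x.1 == "N") == (el.1 == "N")) := by
          rw [List.cons_append, List.takeWhile_append_dropWhile]
        rw [hsplit, List.reverse_append, List.takeWhile_append]
        by_cases hfull : (((rest.dropWhile (fun x => (x.1 == "N") == (el.1 == "N"))).reverse.takeWhile (fun el => el.1 == "N")).length = (rest.dropWhile (fun x => (x.1 == "N") == (el.1 == "N"))).reverse.length)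
        · rw [if_pos hfull]
          have hself : (rest.dropWhile (fun x => (x.1 == "N") == (el.1 == "N"))).reverse.takeWhile (fun el => el.1 == "N") = (rest.dropWhile (fun x => (x.1 == "N") == (el.1 == "N"))).reverse :=
            (List.takeWhile_prefix _).eq_of_length hfull
          have hallK : ∀ x ∈ rest.dropWhile (fun x => (x.1 == "N") == (el.1 == "N")), (x.1 == "N") = true := by
            intro x hx
            have : x ∈ (rest.dropWhile (fun x => (x.1 == "N") == (el.1 == "N"))).reverse.takeWhile (fun el => el.1 == "N") := by
              rw [hself]; simpa using hx
            exact List.mem_takeWhile_imp (p := fun (el : String × Option Char) => el.1 == "N") this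
          obtain ⟨x0, tl, hx0⟩ := List.exists_cons_of_ne_nil hrne
          have hfail : ((x0.1 == "N") == (el.1 == "N")) = false := by
            have hh := List.head_dropWhile_not (fun (x : String × Option Char) => (x.1 == "N") == (el.1 == "N")) hrne
            have h1 : (rest.dropWhile (fun x => (x.1 == "N") == (el.1 == "N"))).head? = some x0 := by rw [hx0]; rfl
            have h2 := List.head?_eq_some_head hrne
            rw [h2] at h1
            rw [Option.some.inj h1] at hh
            exact hh
          have hx0K : (x0.1 == "N") = true := hallK x0 (by rw [hx0]; simp)
          have hKel : (el.1 == "N") = false := by rw [hx0K] at hfail; simpa using hfail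
          have hc0 : ∀ x ∈ (el :: rest.takeWhile (fun x => (x.1 == "N") == (el.1 == "N"))).reverse, (x.1 == "N") = false := by
            intro x hx
            rcases List.mem_cons.mp (List.mem_reverse.mp hx) with hx | hx
            · subst hx; exact hKel
            · have := List.mem_takeWhile_imp hx
              rw [hKel] at this
              simpa using this
          rw [pv_takeWhile_none _ _ hc0]
          rw [List.append_nil, ← hself, ihh]
        · rw [if_neg hfull]
          exact ihh

-- map over an enumerated chunk, given a pointwise fact valid on its index range
theorem pv_enum_map_eq {α β : Type} (f : Int × α → β) (g : α → β) :
    ∀ (c : List α) (p : Int),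
    (∀ (j : Int) (el : α), el ∈ c → p ≤ j → j < p + c.length → f (j, el) = g el) →
    (PySem.List.enumerate c p).map f = c.map g := by
  intro c
  induction c with
  | nil => intro p h; simp [PySem.List.enumerate_nil]
  | cons a c ih =>
    intro p h
    rw [PySem.List.enumerate_cons, List.map_cons, List.map_cons,
      h p a (by simp) (le_refl p) (by simp),
      ih (p + 1) (fun j el hel h1 h2 => h j el (by simp [hel]) (by omega) (by simp at h2 ⊢; omega))]

-- a member chunk is no longer than the flattened whole
theorem pv_len_le_flatten {α : Type} : ∀ (L : List (List α)) (c : List α), c ∈ L → c.length ≤ L.flatten.length := by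
  intro L
  induction L with
  | nil => intro c h; simp at h
  | cons l L ih =>
    intro c h
    rcases List.mem_cons.mp h with h | h
    · subst h; simp
    · have hh := ih c h
      rw [List.length_flatten] at hh
      simp [List.length_flatten]
      omega

-- B'S TAIL: folding the groups after the first one (global index i ≥ 1)
theorem pv_tail (L T n G : Int) :
    ∀ (gs : List (Bool × List (String × Option Char))) (i p : Int) (out : List String),
    gs ≠ [] →
    (∀ g ∈ gs, g.2 ≠ [] ∧ ∀ el ∈ g.2, (el.1 == "N") = g.1) →
    1 ≤ i → L ≤ p →
    p + (((gs.map (·.2)).flatten.length : Nat) : Int) = n →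
    i + (gs.length : Int) = G →
    (∀ g, gs.getLast? = some g → ((g.1 = true → T = (g.2.length : Int)) ∧ T ≤ (g.2.length : Int))) →
    (PySem.List.enumerate gs i).foldl (fun out g =>
      if g.2.1 = true ∧ 0 < g.1 ∧ g.1 < G - 1 then
        out ++ g.2.2.map (fun el => match el.2 with | none => "N" | some s => String.ofList ['-', s])
      else out ++ g.2.2.map (fun el => el.1)) out
    = out ++ (PySem.List.enumerate ((gs.map (·.2)).flatten) p).map (pvPoint L T n) := by
  intro gs
  induction gs with
  | nil => intro i p out hne; exact absurd rfl hne
  | cons g gs ih =>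
    intro i p out hne hwf hi hL hn hG hT
    obtain ⟨b, c⟩ := g
    rw [PySem.List.enumerate_cons, List.foldl_cons]
    show (PySem.List.enumerate gs (i+1)).foldl _
        (if b = true ∧ 0 < i ∧ i < G - 1 then
          out ++ c.map (fun el => match el.2 with | none => "N" | some s => String.ofList ['-', s])
        else out ++ c.map (fun el => el.1)) = _
    by_cases hgs : gs = []
    · subst hgs
      have hcond : ¬(b = true ∧ 0 < i ∧ i < G - 1) := by
        rintro ⟨-, -, hlt⟩
        simp at hG
        omega
      rw [if_neg hcond]
      rw [PySem.List.enumerate_nil, List.foldl_nil]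
      obtain ⟨hcne, hkey⟩ := hwf (b, c) (by simp)
      obtain ⟨hTeq, hTle⟩ := hT (b, c) (by simp)
      have hflat : ((([(b, c)]).map (·.2)).flatten) = c := by simp
      rw [hflat]
      congr 1
      rw [hflat] at hn
      symm
      apply pv_enum_map_eq
      intro j el hel h1 h2
      unfold pvPoint
      rw [if_neg ?_]
      rintro ⟨hLj, hjr, hNel⟩
      cases hb : b with
      | true =>
        have hTc : T = (c.length : Int) := hTeq (by simp [hb])
        simp only at hjr h2
        omega
      | false =>
        have hk := hkey el hel
        rw [hb] at hk
        rw [hNel] at hk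
        simp at hk
    · have hglen : (1:Int) ≤ (gs.length : Int) := by
        have : 0 < gs.length := List.length_pos_iff.mpr hgs
        omega
      obtain ⟨hcne, hkey⟩ := hwf (b, c) (by simp)
      have hTflat : T ≤ (((gs.map (·.2)).flatten.length : Nat) : Int) := by
        obtain ⟨gN, hgN⟩ : ∃ gN, gs.getLast? = some gN := by
          cases h : gs.getLast? with
          | none => exact absurd (List.getLast?_eq_none_iff.mp h) hgs
          | some g => exact ⟨g, rfl⟩
        have hmem : gN ∈ gs := List.mem_of_getLast? hgN
        obtain ⟨-, hTle⟩ := hT gN (by rw [pv_getLast_cons _ _ hgs]; exact hgN)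
        have := pv_len_le_flatten (gs.map (·.2)) gN.2 (List.mem_map_of_mem hmem)
        omega
      have hchunk : (if b = true ∧ 0 < i ∧ i < G - 1 then
            out ++ c.map (fun el => match el.2 with | none => "N" | some s => String.ofList ['-', s])
          else out ++ c.map (fun el => el.1))
          = out ++ (PySem.List.enumerate c p).map (pvPoint L T n) := by
        cases hb : b with
        | true =>
          rw [if_pos ⟨rfl, by omega, by simp at hG ⊢; omega⟩]
          congr 1
          symm
          apply pv_enum_map_eq
          intro j el hel h1 h2
          have hN : el.1 = "N" := by
            have hk := hkey el hel
            rw [hb] at hk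
            simpa using hk
          unfold pvPoint
          rw [if_pos ⟨by omega, by simp [List.length_flatten] at hn hTflat ⊢; omega, hN⟩]
          cases hel2 : el.2 with
          | none => simp [hN]
          | some s => simp
        | false =>
          rw [if_neg (by rintro ⟨hc, -, -⟩; exact Bool.false_ne_true hc)]
          congr 1
          symm
          apply pv_enum_map_eq
          intro j el hel h1 h2
          unfold pvPoint
          rw [if_neg ?_]
          rintro ⟨-, -, hNel⟩
          have hk := hkey el hel
          rw [hNel, hb] at hk
          simp at hk
      rw [hchunk]
      have hrec := ih (i + 1) (p + (c.length : Int)) (out ++ (PySem.List.enumerate c p).map (pvPoint L T n))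
        hgs (fun g hg => hwf g (by simp [hg])) (by omega) (by omega)
        (by simp [List.length_flatten] at hn ⊢; omega) (by simp at hG ⊢; omega)
        (fun g hg => hT g (by rw [pv_getLast_cons _ _ hgs]; exact hg))
      rw [hrec]
      have hflat2 : (((b, c) :: gs).map (·.2)).flatten = c ++ (gs.map (·.2)).flatten := by simp
      rw [hflat2, PySem.List.enumerate_append, List.map_append, List.append_assoc]

-- B'S ROW equals the pointwise spec
theorem pv_row_eqB (row : List String) (seq : List Char) :
    pvRowB row seq = pvSpecRow row seq := by
  simp only [pvRowB, pvSpecRow, pvPad]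
  have hlenpads : row.length ≤ (seq.map some ++ List.replicate (row.length - seq.length) (none : Option Char)).length := by
    simp; omega
  have hfst : (row.zip (seq.map some ++ List.replicate (row.length - seq.length) (none : Option Char))).map Prod.fst = row :=
    List.map_fst_zip hlenpads
  have hpadlen : (row.zip (seq.map some ++ List.replicate (row.length - seq.length) (none : Option Char))).length = row.length := by
    rw [List.length_zip]; simp at hlenpads ⊢; omega
  have hLpad : (row.takeWhile (fun cs => cs == "N")).length
      = ((row.zip (seq.map some ++ List.replicate (row.length - seq.length) (none : Option Char))).takeWhile (fun el => el.1 == "N")).length := by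
    conv_lhs => rw [← hfst]
    rw [List.takeWhile_map, List.length_map]
    rfl
  have hTpad : (row.reverse.takeWhile (fun cs => cs == "N")).length
      = ((row.zip (seq.map some ++ List.replicate (row.length - seq.length) (none : Option Char))).reverse.takeWhile (fun el => el.1 == "N")).length := by
    have hrev : row.reverse = (row.zip (seq.map some ++ List.replicate (row.length - seq.length) (none : Option Char))).reverse.map Prod.fst := by
      rw [List.map_reverse, hfst]
    rw [hrev, List.takeWhile_map, List.length_map]
    rfl
  cases hruns : pvRuns (row.zip (seq.map some ++ List.replicate (row.length - seq.length) (none : Option Char))) with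
  | nil =>
    have hpadnil := (pvRuns_eq_nil_iff _).mp hruns
    have hrow : row = [] := by
      rw [hpadnil] at hpadlen
      exact (List.length_eq_zero_iff).mp hpadlen.symm
    subst hrow
    simp [PySem.List.enumerate_nil]
  | cons g0 gs =>
    obtain ⟨b0, c0⟩ := g0
    have hchunks := pvRuns_chunks (row.zip (seq.map some ++ List.replicate (row.length - seq.length) (none : Option Char)))
    rw [hruns] at hchunks
    have hflat := pvRuns_flatten (row.zip (seq.map some ++ List.replicate (row.length - seq.length) (none : Option Char)))
    rw [hruns] at hflat
    have hhead := pvRuns_head _ b0 c0 gs hruns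
    -- the head-run length (both cases of b0)
    have hLval : ((row.takeWhile (fun cs => cs == "N")).length : Int) = if b0 then (c0.length : Int) else 0 := by
      rw [hLpad, hhead]
      cases b0 <;> simp
    obtain ⟨hc0ne, hc0key⟩ := hchunks (b0, c0) (by simp)
    -- first fold step: the head group is emitted verbatim
    rw [PySem.List.enumerate_cons, List.foldl_cons]
    show (PySem.List.enumerate gs (0+1)).foldl _
        (if b0 = true ∧ (0:Int) < 0 ∧ (0:Int) < (((b0, c0) :: gs).length : Int) - 1 then
          [] ++ c0.map (fun el => match el.2 with | none => "N" | some s => String.ofList ['-', s])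
        else [] ++ c0.map (fun el => el.1)) = _
    rw [if_neg (by rintro ⟨-, h, -⟩; omega)]
    have hc0map : ([] : List String) ++ c0.map (fun el => el.1)
        = (PySem.List.enumerate c0 0).map
            (pvPoint ((row.takeWhile (fun cs => cs == "N")).length : Int)
                     ((row.reverse.takeWhile (fun cs => cs == "N")).length : Int)
                     (row.length : Int)) := by
      rw [List.nil_append]
      symm
      apply pv_enum_map_eq
      intro j el hel h1 h2
      unfold pvPoint
      rw [if_neg ?_]
      rintro ⟨hLj, -, hNel⟩
      cases hb : b0 with
      | true =>
        rw [hLval, if_pos (by rw [hb])] at hLj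
        omega
      | false =>
        have hk := hc0key el hel
        rw [hNel, hb] at hk
        simp at hk
    cases hgs : gs with
    | nil =>
      subst hgs
      rw [PySem.List.enumerate_nil, List.foldl_nil, hc0map]
      have hpadc0 : (row.zip (seq.map some ++ List.replicate (row.length - seq.length) (none : Option Char))) = c0 := by
        rw [← hflat]; simp
      rw [hpadc0]
    | cons g1 gs1 =>
      rw [← hgs]
      have hgsne : gs ≠ [] := by rw [hgs]; simp
      -- the trailing-run facts for pv_tail
      obtain ⟨gN, hgN⟩ : ∃ gN, gs.getLast? = some gN := by
        cases h : gs.getLast? with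
        | none => exact absurd (List.getLast?_eq_none_iff.mp h) hgsne
        | some g => exact ⟨g, rfl⟩
      obtain ⟨init, hinit⟩ := List.getLast?_eq_some_iff.mp hgN
      have hlast := pvRuns_last _ ((b0, c0) :: init) gN (by rw [hruns, hinit]; rfl)
      have hTval : ((row.reverse.takeWhile (fun cs => cs == "N")).length : Int) = if gN.1 then (gN.2.length : Int) else 0 := by
        rw [hTpad, hlast]
        cases gN.1 <;> simp
      have htail := pv_tail ((row.takeWhile (fun cs => cs == "N")).length : Int)
          ((row.reverse.takeWhile (fun cs => cs == "N")).length : Int)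
          (row.length : Int) ((((b0, c0) :: gs).length : Nat) : Int)
          gs 1 (c0.length : Int)
          ([] ++ c0.map (fun el => el.1))
          hgsne (fun g hg => hchunks g (by simp [hg])) (le_refl 1)
          (by rw [hLval]; cases b0 <;> simp)
          (by
            have := congrArg List.length hflat
            rw [hpadlen] at this
            simp only [List.map_cons, List.flatten_cons, List.length_append] at this
            omega)
          (by simp only [List.length_cons]; push_cast; omega)
          (by
            intro g hg
            rw [hgN] at hg
            injection hg with hg
            subst hg
            constructor
            · intro hgN1
              rw [hTval, if_pos hgN1]
            · rw [hTval]
              cases gN.1 <;> simp)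
      simp only [zero_add]
      rw [htail, hc0map]
      have hsplit : (row.zip (seq.map some ++ List.replicate (row.length - seq.length) (none : Option Char)))
          = c0 ++ (gs.map (·.2)).flatten := by
        rw [← hflat]; simp
      rw [hsplit, PySem.List.enumerate_append, List.map_append]
      simp

-- A's _replaceNtoD is B's per-row pass, mapped
theorem pv_replace_eq (css : List (List String)) (seq : String) :
    pvReplaceNtoD css seq = css.map (fun row => pvRowB row seq.toList) := by
  have hstep : (fun (repl : List (List String)) (ic : Int × List String) =>
      (PySem.List.enumerate (List.zip ic.2 seq.toList)).foldl (fun repl jp =>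
        if pvLeftIdxN ic.2 ≤ jp.1 ∧ jp.1 ≤ (ic.2.length : Int) - pvLeftIdxN ic.2.reverse - 1 ∧ jp.2.1 = "N" then
          repl.modify ic.1.toNat (fun row => row.set jp.1.toNat (String.ofList ['-', jp.2.2]))
        else repl) repl)
      = (fun (repl : List (List String)) (ic : Int × List String) =>
        repl.modify ic.1.toNat (fun row =>
          (PySem.List.enumerate (List.zip ic.2 seq.toList)).foldl (fun r jp =>
            if pvLeftIdxN ic.2 ≤ jp.1 ∧ jp.1 ≤ (ic.2.length : Int) - pvLeftIdxN ic.2.reverse - 1 ∧ jp.2.1 = "N" then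
              r.set jp.1.toNat (String.ofList ['-', jp.2.2]) else r) row)) := by
    funext repl ic
    exact pv_foldl_ite_modify ic.1.toNat _ _ _ repl
  have h1 : pvReplaceNtoD css seq
      = (PySem.List.enumerate css).foldl (fun (repl : List (List String)) (ic : Int × List String) =>
        repl.modify ic.1.toNat (fun row =>
          (PySem.List.enumerate (List.zip ic.2 seq.toList)).foldl (fun r jp =>
            if pvLeftIdxN ic.2 ≤ jp.1 ∧ jp.1 ≤ (ic.2.length : Int) - pvLeftIdxN ic.2.reverse - 1 ∧ jp.2.1 = "N" then
              r.set jp.1.toNat (String.ofList ['-', jp.2.2]) else r) row)) css :=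
    congrArg (fun F => List.foldl F css (PySem.List.enumerate css)) hstep
  rw [h1]
  have h2 := pv_foldl_enumerate_modify
      (g := fun (c : List String) (a : List String) =>
        (PySem.List.enumerate (List.zip c seq.toList)).foldl (fun r jp =>
          if pvLeftIdxN c ≤ jp.1 ∧ jp.1 ≤ (c.length : Int) - pvLeftIdxN c.reverse - 1 ∧ jp.2.1 = "N" then
            r.set jp.1.toNat (String.ofList ['-', jp.2.2]) else r) a)
      css [] css rfl
  simp only [List.nil_append, List.length_nil, Nat.cast_zero] at h2
  refine Eq.trans h2 ?_
  rw [List.zipWith_self]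
  exact List.map_congr_left (fun row _ => (pv_row_eqA row seq.toList).trans (pv_row_eqB row seq.toList).symm)

-- per-allele step equality (A's four passes and index-fold vs B's single map)
theorem pv_step_eq (midsv_sample_alleles : List (String × List (List (String × String)))) (kv : String × String)
    (midsv_updated : PySem.Dict String (List (List (String × String)))) :
    PySem.Dict.insert midsv_updated kv.1
      ((PySem.List.enumerate ((pvReplaceNtoD ((((PySem.Dict.mk midsv_sample_alleles).get? kv.1).getD []).map (fun cs => pvSplitComma (((PySem.Dict.mk cs).get? "CSSPLIT").getD ""))) kv.2).map (fun cs => PySem.Str.join "," cs))).foldl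
        (fun st ic => st.modify ic.1.toNat (fun record => (PySem.Dict.insert (PySem.Dict.mk record) "CSSPLIT" ic.2).items))
        (((PySem.Dict.mk midsv_sample_alleles).get? kv.1).getD []))
    = PySem.Dict.insert midsv_updated kv.1
        ((((PySem.Dict.mk midsv_sample_alleles).get? kv.1).getD []).map (fun record =>
          (PySem.Dict.insert (PySem.Dict.mk record) "CSSPLIT"
            (PySem.Str.join "," (pvRowB (pvSplitComma (((PySem.Dict.mk record).get? "CSSPLIT").getD "")) kv.2.toList))).items)) := by
  apply congrArg
  rw [pv_replace_eq, List.map_map, List.map_map]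
  have h2 := pv_foldl_enumerate_modify
      (g := fun (c : String) (record : List (String × String)) => (PySem.Dict.insert (PySem.Dict.mk record) "CSSPLIT" c).items)
      ((((PySem.Dict.mk midsv_sample_alleles).get? kv.1).getD []).map
        ((fun cs => PySem.Str.join "," cs) ∘ (fun row => pvRowB row kv.2.toList) ∘ (fun cs => pvSplitComma (((PySem.Dict.mk cs).get? "CSSPLIT").getD ""))))
      [] (((PySem.Dict.mk midsv_sample_alleles).get? kv.1).getD []) (by simp)
  simp only [List.nil_append, List.length_nil, Nat.cast_zero] at h2
  refine Eq.trans h2 ?_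
  rw [List.zipWith_map_right, List.zipWith_self]
  rfl

-- ===== VERDICT (by name: the statement is the Claim_ definition above) =====
theorem replace_NtoD_spec : Claim_equal_replace_NtoD := by
  intro midsv fasta _ _
  unfold Spec_replace_NtoD
  have hfun : (fun (midsv_updated : PySem.Dict String (List (List (String × String)))) (kv : String × String) =>
      PySem.Dict.insert midsv_updated kv.1
        ((PySem.List.enumerate ((pvReplaceNtoD ((((PySem.Dict.mk midsv).get? kv.1).getD []).map (fun cs => pvSplitComma (((PySem.Dict.mk cs).get? "CSSPLIT").getD ""))) kv.2).map (fun cs => PySem.Str.join "," cs))).foldl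
          (fun st ic => st.modify ic.1.toNat (fun record => (PySem.Dict.insert (PySem.Dict.mk record) "CSSPLIT" ic.2).items))
          (((PySem.Dict.mk midsv).get? kv.1).getD [])))
      = (fun (midsv_updated : PySem.Dict String (List (List (String × String)))) (kv : String × String) =>
      PySem.Dict.insert midsv_updated kv.1
        ((((PySem.Dict.mk midsv).get? kv.1).getD []).map (fun record =>
          (PySem.Dict.insert (PySem.Dict.mk record) "CSSPLIT"
            (PySem.Str.join "," (pvRowB (pvSplitComma (((PySem.Dict.mk record).get? "CSSPLIT").getD "")) kv.2.toList))).items))) := by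
    funext midsv_updated kv
    exact pv_step_eq midsv kv midsv_updated
  exact congrArg PySem.Dict.items (congrArg (fun F => List.foldl F PySem.Dict.empty fasta) hfun)
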